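-- pv_equiv track=rewrite | github.com/MousePotatoDoesStuff/Miniprojects | mutualinfo.py | LimitedPerm
-- ===== SOURCE A (Python) =====
-- def LimitedPerm(X, Y, null=None):
--     n = len(X)
--     M = [[]]
--     for i in range(n):
--         if Y[i] is not null:
--             y = Y[i]
--             for E in M:
--                 E.append(y)
--             continue
--         N = []
--         for F in M:
--             N.extend([F + [e] for e in X[i]])
--         M = N
--     return M
-- ===== SOURCE B (Python) =====
-- def LimitedPerm(X, Y, null=None):
--     n = len(X)
--     branch = [i for i in range(n) if Y[i] is null]
--
--     def combos(bs):
--         if not bs: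
--             return [[]]
--         return [[e] + rest for e in X[bs[0]] for rest in combos(bs[1:])]
--
--     def assemble(i, bs, cs):
--         if i == n:
--             return []
--         if bs and bs[0] == i:
--             return [cs[0]] + assemble(i + 1, bs[1:], cs[1:])
--         return [Y[i]] + assemble(i + 1, bs, cs)
--
--     return [assemble(0, branch, c) for c in combos(branch)]
-- ===== Notes on version B (the rewrite author's own statement) =====
-- stated objective: alternative
-- what changed: A grows a pool of partial rows position by position; B first collects the branching positions, recursively builds the Cartesian combinations of their candidate lists, and then assembles each full row by merging fixed Y-values with one combination.
-- outside the precondition, e.g. on LimitedPerm([[1, 2]], [None], 5): A returns [[None]], B returns [[None]]; on LimitedPerm([[1, 2]], [1000], 1000): A returns [[1000]], B returns [[1000]]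
import Mathlib
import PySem

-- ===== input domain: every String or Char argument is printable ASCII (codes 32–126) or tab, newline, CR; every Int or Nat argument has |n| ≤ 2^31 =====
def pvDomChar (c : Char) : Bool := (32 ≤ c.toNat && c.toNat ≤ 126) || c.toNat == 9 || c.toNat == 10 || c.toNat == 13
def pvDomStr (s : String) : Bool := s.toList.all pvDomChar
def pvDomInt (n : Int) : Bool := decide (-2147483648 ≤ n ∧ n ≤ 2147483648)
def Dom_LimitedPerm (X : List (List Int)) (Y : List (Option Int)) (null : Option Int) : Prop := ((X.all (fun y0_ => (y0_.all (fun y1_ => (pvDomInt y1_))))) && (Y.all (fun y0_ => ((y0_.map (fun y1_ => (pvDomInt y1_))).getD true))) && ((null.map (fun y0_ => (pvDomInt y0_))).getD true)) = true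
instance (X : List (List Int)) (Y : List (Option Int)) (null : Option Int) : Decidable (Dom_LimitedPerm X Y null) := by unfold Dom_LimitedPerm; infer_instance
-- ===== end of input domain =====

-- B builds the rows in two phases (branch positions → Cartesian combinations → assembled rows)
-- instead of A's single pass that grows a pool of partial rows; same cost, different decomposition.

-- ===== PORT A =====
-- Literal port of A's loop: fold over range(len(X)); a fixed position appends Y[i] to every
-- pooled row, a branching position replaces the pool by its extensions with each e ∈ X[i].
-- pyGet? returning none is Python's IndexError (excluded by Pre_; the fold then keeps M),
-- and `.getD 0` unwraps the int Python stores at a fixed position (under Pre_, null = none,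
-- the value there is always `some _`).
def LimitedPerm (X : List (List Int)) (Y : List (Option Int)) (null : Option Int) : List (List Int) :=
  (PySem.List.pyRange 0 (X.length : Int)).foldl
    (fun M i =>
      match PySem.List.pyGet? Y i with
      | none => M
      | some yi =>
        if yi ≠ null then
          M.map (fun E => E ++ [yi.getD 0])
        else
          match PySem.List.pyGet? X i with
          | none => M
          | some xi => M.foldl (fun N F => N ++ xi.map (fun e => F ++ [e])) [])
    [[]]

-- ===== PORT B =====
-- combos(bs): Cartesian product of the candidate lists X[b] for the branching positions bs
-- (recursion on the remaining branch list, as in Source B; pyGet? none = IndexError, excluded by Pre_).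
def pvCombos (X : List (List Int)) : List Int → List (List Int)
  | [] => [[]]
  | b :: bs =>
    ((PySem.List.pyGet? X b).getD []).flatMap (fun e => (pvCombos X bs).map (fun rest => e :: rest))

-- assemble(i, bs, cs): walk the remaining indices (Source B counts i up to n; the obvious structural
-- recursion is over the remaining index list); take the next combination value at a branch
-- position, else Y[i].  `cs.headD 0` is Python's cs[0] (cs is never empty when read, since
-- combinations have one value per branch position), `.getD 0` unwraps Y[i] as in port A.
def pvAssemble (Y : List (Option Int)) : List Int → List Int → List Int → List Int
  | [], _, _ => []
  | i :: is, b :: bs, cs =>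
    if b = i then cs.headD 0 :: pvAssemble Y is bs (cs.drop 1)
    else (((PySem.List.pyGet? Y i).getD none).getD 0) :: pvAssemble Y is (b :: bs) cs
  | i :: is, [], cs => (((PySem.List.pyGet? Y i).getD none).getD 0) :: pvAssemble Y is [] cs

def LimitedPerm_alt (X : List (List Int)) (Y : List (Option Int)) (null : Option Int) : List (List Int) :=
  let idxs := PySem.List.pyRange 0 (X.length : Int)
  let branch := idxs.filter (fun i => PySem.List.pyGet? Y i == some null)
  (pvCombos X branch).map (fun c => pvAssemble Y idxs branch c)

-- ===== PRECONDITION & SPEC =====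
-- Pre_ excludes (a) len(X) > len(Y), where A raises IndexError, and (b) the non-None-null inputs
-- where A's `Y[i] is not null` probes CPython object identity of int objects, which is not a
-- function of the values (an uncached equal int compares `is`-unequal) or lets A emit rows
-- containing None, outside the declared type; kept inside are the non-None nulls whose identity
-- test is value-determined (None absent from Y[:len(X)], and null cached in -5..256 or absent).
def Pre_LimitedPerm (X : List (List Int)) (Y : List (Option Int)) (null : Option Int) : Prop :=
  X.length ≤ Y.length ∧
  null.all (fun k =>
    (Y.take X.length).all (fun y => !(y == none)) &&
    ((decide (-5 ≤ k) && decide (k ≤ 256)) || (Y.take X.length).all (fun y => !(y == some k)))) = true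
instance (X : List (List Int)) (Y : List (Option Int)) (null : Option Int) : Decidable (Pre_LimitedPerm X Y null) := by unfold Pre_LimitedPerm; infer_instance
def pvWitness_LimitedPerm : List (List Int) × List (Option Int) × Option Int :=
  ([[1, 2], [3]], [none, some 7], none)
def Spec_LimitedPerm (X : List (List Int)) (Y : List (Option Int)) (null : Option Int) (out : List (List Int)) : Prop := out = LimitedPerm_alt X Y null
instance (X : List (List Int)) (Y : List (Option Int)) (null : Option Int) (out : List (List Int)) : Decidable (Spec_LimitedPerm X Y null out) := by unfold Spec_LimitedPerm; infer_instance

-- ===== CLAIM (what is proved, stated in full; the proofs are below) =====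
def Claim_equal_LimitedPerm : Prop := ∀ (X : List (List Int)) (Y : List (Option Int)) (null : Option Int), Dom_LimitedPerm X Y null → Pre_LimitedPerm X Y null → Spec_LimitedPerm X Y null (LimitedPerm X Y null)

-- ===== LEMMAS AND PROOFS =====

-- Common specification: the rows generated by the positions (X[i], Y[i]) from position a on
-- (both ports test a position against `null` by value equality).
def pvRows (null : Option Int) : List (List Int × Option Int) → List (List Int)
  | [] => [[]]
  | (xi, yi) :: rest =>
    if yi ≠ null then (pvRows null rest).map (fun r => yi.getD 0 :: r)
    else xi.flatMap (fun e => (pvRows null rest).map (fun r => e :: r))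

-- A's fold from position a on computes M ⋈ pvRows (suffix).
theorem pvFoldA_spec (X : List (List Int)) (Y : List (Option Int)) (null : Option Int)
    (h : X.length ≤ Y.length) :
    ∀ (d a : Nat), a + d = X.length → ∀ (M : List (List Int)),
    (PySem.List.pyRange (a : Int) (X.length : Int)).foldl
      (fun M i =>
        match PySem.List.pyGet? Y i with
        | none => M
        | some yi =>
          if yi ≠ null then
            M.map (fun E => E ++ [yi.getD 0])
          else
            match PySem.List.pyGet? X i with
            | none => M
            | some xi => M.foldl (fun N F => N ++ xi.map (fun e => F ++ [e])) []) M
    = M.flatMap (fun F => (pvRows null ((X.drop a).zip (Y.drop a))).map (fun r => F ++ r)) := by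
  intro d
  induction d with
  | zero =>
    intro a ha M
    have ha' : a = X.length := by omega
    subst ha'
    have hr : PySem.List.pyRange (X.length : Int) (X.length : Int) = [] := by
      simp [PySem.List.pyRange]
    rw [hr]
    simp [List.drop_length, pvRows]
  | succ d ih =>
    intro a ha M
    have hx : a < X.length := by omega
    have hy : a < Y.length := by omega
    rw [PySem.List.pyRange_one_cons (by exact_mod_cast hx)]
    simp only [List.foldl_cons]
    have hcast : ((a : Int) + 1) = ((a + 1 : Nat) : Int) := by push_cast; ring
    have hYa : PySem.List.pyGet? Y (a : Int) = some (Y[a]) := by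
      rw [PySem.List.pyGet?_natCast]; simp [hy]
    have hXa : PySem.List.pyGet? X (a : Int) = some (X[a]) := by
      rw [PySem.List.pyGet?_natCast]; simp [hx]
    have hdX : X.drop a = X[a] :: X.drop (a + 1) := List.drop_eq_getElem_cons hx
    have hdY : Y.drop a = Y[a] :: Y.drop (a + 1) := List.drop_eq_getElem_cons hy
    rw [hYa]
    by_cases hyn : Y[a] = null
    · simp only [hyn, ne_eq, not_true_eq_false, if_false]
      rw [hXa]
      simp only []
      rw [PySem.List.foldl_append_eq_flatMap]
      rw [hcast, ih (a + 1) (by omega)]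
      rw [hdX, hdY]
      simp only [List.zip_cons_cons, pvRows, hyn, ne_eq, not_true_eq_false, if_false]
      simp [List.flatMap_map, List.map_map, List.map_flatMap, List.flatMap_assoc,
        Function.comp_def, List.append_assoc]
    · simp only [ne_eq, hyn, not_false_eq_true, if_true]
      rw [hcast, ih (a + 1) (by omega)]
      rw [hdX, hdY]
      simp only [List.zip_cons_cons, pvRows, ne_eq, hyn, not_false_eq_true, if_true]
      simp [List.flatMap_map, List.map_map, Function.comp_def, List.append_assoc]

-- every branch index taken from pyRange (a+1) … is ≥ a+1, hence ≠ a
theorem pvBranch_head_ne (Y : List (Option Int)) (null : Option Int) (a : Nat) (n : Int)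
    (b : Int) (bs : List Int)
    (hf : (PySem.List.pyRange ((a : Int) + 1) n).filter
        (fun i => PySem.List.pyGet? Y i == some null) = b :: bs) :
    ¬ b = (a : Int) := by
  have hb : b ∈ (PySem.List.pyRange ((a : Int) + 1) n).filter
      (fun i => PySem.List.pyGet? Y i == some null) := by
    rw [hf]; exact List.mem_cons_self
  have := List.mem_of_mem_filter hb
  have := (PySem.List.mem_pyRange_one).mp this
  omega

-- B's combine-then-assemble from position a on computes pvRows (suffix).
theorem pvAltB_spec (X : List (List Int)) (Y : List (Option Int)) (null : Option Int)
    (h : X.length ≤ Y.length) :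
    ∀ (d a : Nat), a + d = X.length →
    (pvCombos X ((PySem.List.pyRange (a : Int) (X.length : Int)).filter
        (fun i => PySem.List.pyGet? Y i == some null))).map
      (fun c => pvAssemble Y (PySem.List.pyRange (a : Int) (X.length : Int))
        ((PySem.List.pyRange (a : Int) (X.length : Int)).filter
          (fun i => PySem.List.pyGet? Y i == some null)) c)
    = pvRows null ((X.drop a).zip (Y.drop a)) := by
  intro d
  induction d with
  | zero =>
    intro a ha
    have ha' : a = X.length := by omega
    subst ha'
    have hr : PySem.List.pyRange (X.length : Int) (X.length : Int) = [] := by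
      simp [PySem.List.pyRange]
    rw [hr]
    simp [List.drop_length, pvRows, pvCombos, pvAssemble]
  | succ d ih =>
    intro a ha
    have hx : a < X.length := by omega
    have hy : a < Y.length := by omega
    have hcast : ((a : Int) + 1) = ((a + 1 : Nat) : Int) := by push_cast; ring
    have hYa : PySem.List.pyGet? Y (a : Int) = some (Y[a]) := by
      rw [PySem.List.pyGet?_natCast]; simp [hy]
    have hXa : PySem.List.pyGet? X (a : Int) = some (X[a]) := by
      rw [PySem.List.pyGet?_natCast]; simp [hx]
    have hdX : X.drop a = X[a] :: X.drop (a + 1) := List.drop_eq_getElem_cons hx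
    have hdY : Y.drop a = Y[a] :: Y.drop (a + 1) := List.drop_eq_getElem_cons hy
    rw [PySem.List.pyRange_one_cons (by exact_mod_cast hx)]
    rw [List.filter_cons]
    by_cases hyn : Y[a] = null
    · have hp : (PySem.List.pyGet? Y (a : Int) == some null) = true := by
        rw [hYa, hyn]; simp
      rw [hp]
      simp only [if_pos]
      rw [show (pvCombos X ((a : Int) ::
          (PySem.List.pyRange ((a : Int) + 1) (X.length : Int)).filter
            (fun i => PySem.List.pyGet? Y i == some null)))
        = (X[a]).flatMap (fun e => (pvCombos X
            ((PySem.List.pyRange ((a : Int) + 1) (X.length : Int)).filter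
              (fun i => PySem.List.pyGet? Y i == some null))).map
          (fun rest => e :: rest)) from by rw [pvCombos, hXa]; rfl]
      rw [List.map_flatMap]
      rw [hdX, hdY]
      simp only [List.zip_cons_cons, pvRows, hyn, ne_eq, not_true_eq_false, if_false]
      apply List.flatMap_congr
      intro e he
      simp only [List.map_map, Function.comp_def]
      have hstep : ∀ c, pvAssemble Y ((a : Int) :: PySem.List.pyRange ((a : Int) + 1) (X.length : Int))
          ((a : Int) :: (PySem.List.pyRange ((a : Int) + 1) (X.length : Int)).filter
            (fun i => PySem.List.pyGet? Y i == some null)) (e :: c)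
          = e :: pvAssemble Y (PySem.List.pyRange ((a : Int) + 1) (X.length : Int))
            ((PySem.List.pyRange ((a : Int) + 1) (X.length : Int)).filter
              (fun i => PySem.List.pyGet? Y i == some null)) c := by
        intro c; simp [pvAssemble]
      calc
        _ = ((pvCombos X ((PySem.List.pyRange ((a : Int) + 1) (X.length : Int)).filter
              (fun i => PySem.List.pyGet? Y i == some null))).map
            (fun c => pvAssemble Y (PySem.List.pyRange ((a : Int) + 1) (X.length : Int))
              ((PySem.List.pyRange ((a : Int) + 1) (X.length : Int)).filter
                (fun i => PySem.List.pyGet? Y i == some null)) c)).map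
            (fun r => e :: r) := by
          simp only [List.map_map]
          exact List.map_congr_left (fun c _ => hstep c)
        _ = (pvRows null ((X.drop (a + 1)).zip (Y.drop (a + 1)))).map (fun r => e :: r) := by
          rw [hcast, ih (a + 1) (by omega)]
    · have hp : (PySem.List.pyGet? Y (a : Int) == some null) = false := by
        rw [hYa]; simp [hyn]
      rw [hp]
      simp only [Bool.false_eq_true, if_neg, not_false_eq_true]
      have hstep : ∀ c, pvAssemble Y ((a : Int) :: PySem.List.pyRange ((a : Int) + 1) (X.length : Int))
          ((PySem.List.pyRange ((a : Int) + 1) (X.length : Int)).filter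
            (fun i => PySem.List.pyGet? Y i == some null)) c
          = Y[a].getD 0 :: pvAssemble Y (PySem.List.pyRange ((a : Int) + 1) (X.length : Int))
            ((PySem.List.pyRange ((a : Int) + 1) (X.length : Int)).filter
              (fun i => PySem.List.pyGet? Y i == some null)) c := by
        intro c
        cases hf : (PySem.List.pyRange ((a : Int) + 1) (X.length : Int)).filter
            (fun i => PySem.List.pyGet? Y i == some null) with
        | nil => simp [pvAssemble, hYa]
        | cons b bs =>
          have hne := pvBranch_head_ne Y null a (X.length : Int) b bs hf
          simp [pvAssemble, hne, hYa]
      calc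
        _ = ((pvCombos X ((PySem.List.pyRange ((a : Int) + 1) (X.length : Int)).filter
              (fun i => PySem.List.pyGet? Y i == some null))).map
            (fun c => pvAssemble Y (PySem.List.pyRange ((a : Int) + 1) (X.length : Int))
              ((PySem.List.pyRange ((a : Int) + 1) (X.length : Int)).filter
                (fun i => PySem.List.pyGet? Y i == some null)) c)).map
            (fun r => Y[a].getD 0 :: r) := by
          simp only [List.map_map]
          exact List.map_congr_left (fun c _ => hstep c)
        _ = pvRows null ((X.drop a).zip (Y.drop a)) := by
          rw [hcast, ih (a + 1) (by omega)]
          rw [hdX, hdY]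
          simp only [List.zip_cons_cons, pvRows, ne_eq, hyn, not_false_eq_true, if_true]

-- ===== VERDICT (by name: the statement is the Claim_ definition above) =====
theorem LimitedPerm_spec : Claim_equal_LimitedPerm := by
  intro X Y null _hDom hPre
  obtain ⟨hlen, -⟩ := hPre
  unfold Spec_LimitedPerm LimitedPerm LimitedPerm_alt
  have hA := pvFoldA_spec X Y null hlen X.length 0 (by omega) [[]]
  have hB := pvAltB_spec X Y null hlen X.length 0 (by omega)
  simp only [Nat.cast_zero, List.drop_zero] at hA hB
  rw [hA]
  simp only []
  rw [hB]
  simp
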